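-- pv_equiv track=rewrite | github.com/brasileiroaraujo/FAIR | data_distribution_assessment/group_definition.py | strategy_groups_by_distribution
-- ===== SOURCE A (Python) =====
-- def strategy_groups_by_distribution(frequency_thresholds, cumulative_distribution):
--     """
--     Groups the data into variable-sized groups based on frequency thresholds.
--
--     :param frequency_thresholds: List of thresholds defining group ranges (in descending order).
--     :param cumulative_distribution: A dictionary with items and their cumulative distribution values.
--     :return: A dictionary with groups defined by thresholds and an "others" group.
--     """
--     if not frequency_thresholds:
--         raise ValueError("Frequency thresholds must be provided.")
--
--     # Sort the cumulative distribution by values in descending order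
--     sorted_distribution = sorted(cumulative_distribution.items(), key=lambda x: x[1], reverse=True)
--
--     grouped_distribution = {}
--     others_total = 0
--
--     for threshold in frequency_thresholds:
--         group_name = f"above_{threshold}"
--         group_total = 0
--
--         # Collect items above the current threshold
--         for key, value in sorted_distribution[:]:
--             if value > threshold:
--                 group_total += value
--                 sorted_distribution.remove((key, value))
--
--         if group_total > 0:
--             grouped_distribution[group_name] = group_total
--
--     # Remaining items go into "others"
--     others_total = sum(value for _, value in sorted_distribution)
--     if others_total > 0:
--         grouped_distribution["others"] = others_total
--
--     return grouped_distribution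
-- ===== SOURCE B (Python) =====
-- def strategy_groups_by_distribution(frequency_thresholds, cumulative_distribution):
--     """
--     Groups the data into variable-sized groups based on frequency thresholds.
--
--     Sorts the values once (descending); for each threshold, the items above it
--     form a prefix of the still-unconsumed values, so a single pointer sweeps
--     forward consuming that prefix -- no rescans and no list removals.
--     """
--     if not frequency_thresholds:
--         raise ValueError("Frequency thresholds must be provided.")
--
--     vals = sorted(cumulative_distribution.values(), reverse=True)
--     p = 0
--     grouped_distribution = {}
--     for threshold in frequency_thresholds:
--         group_total = 0
--         while p < len(vals) and vals[p] > threshold: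
--             group_total += vals[p]
--             p += 1
--         if group_total > 0:
--             grouped_distribution[f"above_{threshold}"] = group_total
--
--     others_total = sum(vals[p:])
--     if others_total > 0:
--         grouped_distribution["others"] = others_total
--     return grouped_distribution
-- ===== Notes on version B (the rewrite author's own statement) =====
-- stated objective: faster
-- what changed: B sorts the values once (descending) and sweeps a single pointer forward, consuming the prefix of still-unconsumed values above each threshold, instead of A's per-threshold rescan of a copy with element-by-element list.remove on sorted pairs.
import Mathlib
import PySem

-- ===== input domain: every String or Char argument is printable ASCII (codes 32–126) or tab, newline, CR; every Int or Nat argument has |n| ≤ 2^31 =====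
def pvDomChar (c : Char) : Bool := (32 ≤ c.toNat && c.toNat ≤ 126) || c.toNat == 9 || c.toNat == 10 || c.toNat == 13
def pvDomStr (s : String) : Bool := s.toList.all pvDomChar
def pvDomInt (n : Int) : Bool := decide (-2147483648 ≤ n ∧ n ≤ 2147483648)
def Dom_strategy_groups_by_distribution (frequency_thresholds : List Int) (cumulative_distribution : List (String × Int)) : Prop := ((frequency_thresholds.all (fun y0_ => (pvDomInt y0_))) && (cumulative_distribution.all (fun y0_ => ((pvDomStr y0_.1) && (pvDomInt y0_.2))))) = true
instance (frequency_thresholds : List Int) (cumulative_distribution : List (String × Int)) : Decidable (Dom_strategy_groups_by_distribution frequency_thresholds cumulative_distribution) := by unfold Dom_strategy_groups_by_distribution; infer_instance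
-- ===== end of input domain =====

-- B replaces A's per-threshold rescan-and-remove of a sorted copy by one classifying pass
-- accumulating per-threshold sums (objective: faster).

-- ===== PORT A =====
-- A sorts the items by value (descending), then for every threshold rescans a copy of the
-- remaining list, summing and removing the items above the threshold; positive group sums are
-- inserted into a dict, and the leftover sum becomes "others" when positive.
def strategy_groups_by_distribution (frequency_thresholds : List Int) (cumulative_distribution : List (String × Int)) : List (String × Int) :=
  if frequency_thresholds = [] then []  -- Python raises ValueError here; excluded by Pre_
  else
    let sorted0 := PySem.List.sorted cumulative_distribution (fun x => x.2) true
    let st := frequency_thresholds.foldl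
      (fun (st : PySem.Dict String Int × List (String × Int)) t =>
        -- inner loop: iterate over a copy st.2, removing matched items from the current list
        let inner := st.2.foldl
          (fun (p : Int × List (String × Int)) kv =>
            if kv.2 > t then (p.1 + kv.2, (PySem.List.remove? p.2 kv).getD p.2) else p)
          ((0 : Int), st.2)
        let d := if inner.1 > 0 then st.1.insert ("above_" ++ PySem.Int.toStr t) inner.1 else st.1
        (d, inner.2))
      (PySem.Dict.empty, sorted0)
    let others := (st.2.map (fun kv => kv.2)).sum
    let d := if others > 0 then st.1.insert "others" others else st.1
    d.items

-- ===== PORT B =====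
-- B-side helper: the pointer-sweep while-loop (consume the leading values above t, summing them)
def pvSweep (t : Int) (acc : Int) : List Int → Int × List Int
  | [] => (acc, [])
  | v :: vs => if v > t then pvSweep t (acc + v) vs else (acc, v :: vs)

-- sort the values once (descending); for each threshold the items above it are a prefix of the
-- unconsumed values, swept off by a pointer; positive groups then "others" as in A.
def strategy_groups_by_distribution_alt (frequency_thresholds : List Int) (cumulative_distribution : List (String × Int)) : List (String × Int) :=
  if frequency_thresholds = [] then []  -- Python raises ValueError here; excluded by Pre_
  else
    let vals := PySem.List.sorted (cumulative_distribution.map (fun kv => kv.2)) (fun x => x) true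
    let st := frequency_thresholds.foldl
      (fun (st : PySem.Dict String Int × List Int) t =>
        let r := pvSweep t 0 st.2
        ((if r.1 > 0 then st.1.insert ("above_" ++ PySem.Int.toStr t) r.1 else st.1), r.2))
      (PySem.Dict.empty, vals)
    let others := st.2.sum
    let d := if others > 0 then st.1.insert "others" others else st.1
    d.items

-- ===== PRECONDITION & SPEC =====
-- Pre_ excludes only the empty threshold list, on which Python A (and B) raise ValueError.
def Pre_strategy_groups_by_distribution (frequency_thresholds : List Int) (cumulative_distribution : List (String × Int)) : Prop := frequency_thresholds ≠ []
instance (frequency_thresholds : List Int) (cumulative_distribution : List (String × Int)) : Decidable (Pre_strategy_groups_by_distribution frequency_thresholds cumulative_distribution) := by unfold Pre_strategy_groups_by_distribution; infer_instance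

def pvWitness_strategy_groups_by_distribution : List Int × (List (String × Int)) := ([10, 3], [("a", 15), ("b", 4), ("c", 1)])

def Spec_strategy_groups_by_distribution (frequency_thresholds : List Int) (cumulative_distribution : List (String × Int)) (out : List (String × Int)) : Prop := out = strategy_groups_by_distribution_alt frequency_thresholds cumulative_distribution
instance (frequency_thresholds : List Int) (cumulative_distribution : List (String × Int)) (out : List (String × Int)) : Decidable (Spec_strategy_groups_by_distribution frequency_thresholds cumulative_distribution out) := by unfold Spec_strategy_groups_by_distribution; infer_instance

-- ===== CLAIM (what is proved, stated in full; the proofs are below) =====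
def Claim_equal_strategy_groups_by_distribution : Prop := ∀ (frequency_thresholds : List Int) (cumulative_distribution : List (String × Int)), Dom_strategy_groups_by_distribution frequency_thresholds cumulative_distribution → Pre_strategy_groups_by_distribution frequency_thresholds cumulative_distribution → Spec_strategy_groups_by_distribution frequency_thresholds cumulative_distribution (strategy_groups_by_distribution frequency_thresholds cumulative_distribution)

-- ===== LEMMAS AND PROOFS =====

-- group name of a threshold
def pvName (t : Int) : String := "above_" ++ PySem.Int.toStr t

-- index of the first threshold a value exceeds
def pvFirst (ts : List Int) (v : Int) : Option Nat := ts.findIdx? (fun t => decide (v > t))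

-- sum of the values assigned to threshold index i
-- sum of the values exceeding no threshold
def pvOthers (ts : List Int) (cd : List (String × Int)) : Int :=
  ((cd.filter (fun kv => decide (pvFirst ts kv.2 = none))).map (fun kv => kv.2)).sum

-- (name, group-sum) pairs, one per threshold, consuming matched items as A does
def pvPairs : List Int → List (String × Int) → List (String × Int)
  | [], _ => []
  | t :: ts, cd =>
      (pvName t, ((cd.filter (fun kv => decide (kv.2 > t))).map (fun kv => kv.2)).sum)
        :: pvPairs ts (cd.filter (fun kv => !decide (kv.2 > t)))

-- items left after all thresholds
def pvResid : List Int → List (String × Int) → List (String × Int)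
  | [], cd => cd
  | t :: ts, cd => pvResid ts (cd.filter (fun kv => !decide (kv.2 > t)))



def pvVal (l : List Char) : Nat := l.foldl (fun a c => 10 * a + (c.toNat - 48)) 0

theorem pvVal_append (l : List Char) (c : Char) : pvVal (l ++ [c]) = 10 * pvVal l + (c.toNat - 48) := by
  simp [pvVal, List.foldl_append]

theorem pv_tdc_shift (b : Nat) : ∀ (f n : Nat) (l : List Char), Nat.toDigitsCore b f n l = Nat.toDigitsCore b f n [] ++ l := by
  intro f
  induction f with
  | zero => intro n l; simp [Nat.toDigitsCore]
  | succ f ih =>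
      intro n l
      simp only [Nat.toDigitsCore]
      by_cases h : n / b = 0
      · simp [h]
      · simp only [if_neg h]
        rw [ih (n / b) [Nat.digitChar (n % b)], ih (n / b) (Nat.digitChar (n % b) :: l)]
        simp

theorem pv_digitChar_toNat {d : Nat} (h : d < 10) : (Nat.digitChar d).toNat = 48 + d := by
  interval_cases d <;> decide

theorem pv_digitChar_digit {d : Nat} (h : d < 10) : 48 ≤ (Nat.digitChar d).toNat ∧ (Nat.digitChar d).toNat ≤ 57 := by
  interval_cases d <;> decide

theorem pv_tdc_val : ∀ (f n : Nat), n < f → pvVal (Nat.toDigitsCore 10 f n []) = n := by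
  intro f
  induction f with
  | zero => omega
  | succ f ih =>
      intro n hn
      simp only [Nat.toDigitsCore]
      by_cases h : n / 10 = 0
      · have h10 : n < 10 := by omega
        have hm : n % 10 = n := Nat.mod_eq_of_lt h10
        simp [h, hm, pvVal, pv_digitChar_toNat h10]
      · simp only [if_neg h]
        rw [pv_tdc_shift]
        rw [pvVal_append]
        have hlt : n / 10 < f := by
          have := Nat.div_lt_self (by omega : 0 < n) (by omega : 1 < 10)
          omega
        rw [ih _ hlt, pv_digitChar_toNat (Nat.mod_lt n (by omega))]
        omega

theorem pv_toDigits_val (n : Nat) : pvVal (Nat.toDigits 10 n) = n := by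
  have : Nat.toDigits 10 n = Nat.toDigitsCore 10 (n + 1) n [] := rfl
  rw [this, pv_tdc_val (n + 1) n (by omega)]

theorem pv_toDigits_inj {a b : Nat} (h : Nat.toDigits 10 a = Nat.toDigits 10 b) : a = b := by
  have := pv_toDigits_val a
  rw [h, pv_toDigits_val b] at this
  omega

theorem pv_tdc_digits : ∀ (f n : Nat) (l : List Char), (∀ c ∈ l, 48 ≤ c.toNat ∧ c.toNat ≤ 57) → ∀ c ∈ Nat.toDigitsCore 10 f n l, 48 ≤ c.toNat ∧ c.toNat ≤ 57 := by
  intro f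
  induction f with
  | zero => intro n l hl; simpa [Nat.toDigitsCore] using hl
  | succ f ih =>
      intro n l hl
      simp only [Nat.toDigitsCore]
      have hd : ∀ c ∈ Nat.digitChar (n % 10) :: l, 48 ≤ c.toNat ∧ c.toNat ≤ 57 := by
        intro c hc
        rcases List.mem_cons.mp hc with rfl | hc
        · exact pv_digitChar_digit (Nat.mod_lt n (by omega))
        · exact hl c hc
      by_cases h : n / 10 = 0
      · simp only [h]; exact hd
      · simp only [if_neg h]; exact ih _ _ hd

theorem pv_tdc_ne_nil (f n : Nat) (l : List Char) : Nat.toDigitsCore 10 (f + 1) n l ≠ [] := by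
  cases f with
  | zero => simp only [Nat.toDigitsCore]; split <;> simp
  | succ f =>
      simp only [Nat.toDigitsCore]
      split
      · simp
      · rw [pv_tdc_shift]
        split <;> simp


theorem pv_toChars_digits (n : Nat) : ∀ c ∈ Nat.toDigits 10 n, 48 ≤ c.toNat ∧ c.toNat ≤ 57 :=
  pv_tdc_digits (n + 1) n [] (by simp)

theorem pv_toDigits_ne_nil (n : Nat) : Nat.toDigits 10 n ≠ [] := pv_tdc_ne_nil n n []

theorem pv_toChars_inj {a b : Int} (h : PySem.Int.toChars a = PySem.Int.toChars b) : a = b := by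
  unfold PySem.Int.toChars at h
  by_cases ha : a < 0 <;> by_cases hb : b < 0 <;> simp [ha, hb] at h
  · have := pv_toDigits_inj h
    omega
  · exfalso
    rcases List.exists_cons_of_ne_nil (pv_toDigits_ne_nil b.toNat) with ⟨c, l, hc⟩
    rw [hc] at h
    have hd := pv_toChars_digits b.toNat c (by rw [hc]; simp)
    have : ('-' : Char) = c := by exact (List.cons_eq_cons.mp h).1
    rw [← this] at hd
    simp [Char.toNat] at hd
  · exfalso
    rcases List.exists_cons_of_ne_nil (pv_toDigits_ne_nil a.toNat) with ⟨c, l, hc⟩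
    rw [hc] at h
    have hd := pv_toChars_digits a.toNat c (by rw [hc]; simp)
    have : c = ('-' : Char) := by exact (List.cons_eq_cons.mp h).1
    rw [this] at hd
    simp [Char.toNat] at hd
  · have := pv_toDigits_inj h
    omega

theorem pv_name_inj {a b : Int} (h : ("above_" ++ PySem.Int.toStr a) = ("above_" ++ PySem.Int.toStr b)) : a = b := by
  have h2 : ("above_" ++ PySem.Int.toStr a).toList = ("above_" ++ PySem.Int.toStr b).toList := by rw [h]
  simp only [String.toList_append] at h2
  have h3 := List.append_cancel_left h2
  rw [PySem.Int.toList_toStr, PySem.Int.toList_toStr] at h3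
  exact pv_toChars_inj h3

theorem pv_name_ne_others (t : Int) : ("above_" ++ PySem.Int.toStr t) ≠ "others" := by
  intro h
  have h2 : ("above_" ++ PySem.Int.toStr t).toList = ("others" : String).toList := by rw [h]
  simp only [String.toList_append] at h2
  have : ('a' :: 'b' :: 'o' :: 'v' :: 'e' :: '_' :: (PySem.Int.toStr t).toList) = ['o','t','h','e','r','s'] := h2
  simp at this

-- remove? of the junction occurrence

theorem pv_remove_append_cons {α : Type} [BEq α] [LawfulBEq α] (pk rest : List α) (v : α) (h : v ∉ pk) :
    PySem.List.remove? (pk ++ v :: rest) v = some (pk ++ rest) := by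
  induction pk with
  | nil => simp [PySem.List.remove?_cons_self]
  | cons x xs ih =>
      have hx : x ≠ v := by intro hh; exact h (by simp [hh])
      rw [List.cons_append, PySem.List.remove?_cons_of_ne _ hx, ih (by intro hh; exact h (by simp [hh]))]
      simp

-- A's inner loop: iterating over a copy while removing from the current list = filtering
theorem pv_inner (t : Int) :
    ∀ (todo pk : List (String × Int)) (acc : Int), (∀ y ∈ pk, ¬ y.2 > t) →
    todo.foldl (fun (p : Int × List (String × Int)) kv =>
        if kv.2 > t then (p.1 + kv.2, (PySem.List.remove? p.2 kv).getD p.2) else p) (acc, pk ++ todo)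
      = (acc + ((todo.filter (fun kv => decide (kv.2 > t))).map (fun kv => kv.2)).sum,
         pk ++ todo.filter (fun kv => !decide (kv.2 > t))) := by
  intro todo
  induction todo with
  | nil => intro pk acc h; simp
  | cons kv rest ih =>
      intro pk acc h
      by_cases hkv : kv.2 > t
      · have hnm : kv ∉ pk := fun hm => h kv hm hkv
        simp only [List.foldl_cons, if_pos hkv]
        rw [pv_remove_append_cons pk rest kv hnm, Option.getD_some, ih pk (acc + kv.2) h]
        simp [hkv, add_assoc]
      · have : pk ++ kv :: rest = (pk ++ [kv]) ++ rest := by simp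
        simp only [List.foldl_cons, if_neg hkv, this]
        rw [ih (pk ++ [kv]) acc (by intro y hy; rcases List.mem_append.mp hy with hy | hy
                                    · exact h y hy
                                    · simp at hy; subst hy; exact hkv)]
        simp [hkv]

-- A's outer loop = conditional inserts of pvPairs + pvResid
theorem pv_outer (ts : List Int) :
    ∀ (cur : List (String × Int)) (d : PySem.Dict String Int),
    ts.foldl (fun (st : PySem.Dict String Int × List (String × Int)) t =>
        let inner := st.2.foldl
          (fun (p : Int × List (String × Int)) kv =>
            if kv.2 > t then (p.1 + kv.2, (PySem.List.remove? p.2 kv).getD p.2) else p)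
          ((0 : Int), st.2)
        let d := if inner.1 > 0 then st.1.insert ("above_" ++ PySem.Int.toStr t) inner.1 else st.1
        (d, inner.2)) (d, cur)
      = ((pvPairs ts cur).foldl (fun d p => if p.2 > 0 then d.insert p.1 p.2 else d) d, pvResid ts cur) := by
  induction ts with
  | nil => intro cur d; simp [pvPairs, pvResid]
  | cons t ts ih =>
      intro cur d
      simp only [List.foldl_cons]
      have hi := pv_inner t cur [] 0 (by simp)
      simp only [List.nil_append] at hi
      rw [hi, ih]
      simp [pvPairs, pvResid, pvName]

-- conditional-insert fold over pairs with pairwise-compatible keys appends the positive pairs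
theorem pv_items_condFold :
    ∀ (l : List (String × Int)) (d : PySem.Dict String Int),
    (∀ p ∈ l, p.2 > 0 → d.contains p.1 = false) →
    l.Pairwise (fun p q => p.2 > 0 → q.2 > 0 → p.1 ≠ q.1) →
    (l.foldl (fun d p => if p.2 > 0 then d.insert p.1 p.2 else d) d).items
      = d.items ++ l.filter (fun p => decide (p.2 > 0)) := by
  intro l
  induction l with
  | nil => intro d _ _; simp
  | cons p l ih =>
      intro d hf hp
      rcases List.pairwise_cons.mp hp with ⟨hph, hpt⟩
      by_cases hpos : p.2 > 0
      · simp only [List.foldl_cons, if_pos hpos]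
        rw [ih (d.insert p.1 p.2) ?_ hpt]
        · rw [PySem.Dict.items_insert_of_not_contains _ _ (hf p (by simp) hpos)]
          simp [hpos]
        · intro q hq hqpos
          rw [PySem.Dict.contains_insert]
          have h1 : (q.1 == p.1) = false := by
            simp only [beq_eq_false_iff_ne, ne_eq]
            exact fun hh => hph q hq hpos hqpos hh.symm
          rw [h1, hf q (by simp [hq]) hqpos]
          rfl
      · simp only [List.foldl_cons, if_neg hpos]
        rw [ih d (fun q hq => hf q (by simp [hq])) hpt]
        simp [hpos]

theorem pv_first_cons (t : Int) (ts : List Int) (v : Int) :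
    pvFirst (t :: ts) v = if v > t then some 0 else (pvFirst ts v).map (fun i => i + 1) := by
  simp only [pvFirst, List.findIdx?_cons]
  by_cases h : v > t <;> simp [h]

-- pvPairs/pvResid depend on the item list only through its multiset
theorem pv_pvPairs_perm (ts : List Int) : ∀ {c c' : List (String × Int)}, c.Perm c' → pvPairs ts c = pvPairs ts c' := by
  induction ts with
  | nil => intro c c' _; rfl
  | cons t ts ih =>
      intro c c' h
      simp only [pvPairs]
      rw [List.Perm.sum_eq ((h.filter _).map _), ih (h.filter _)]

theorem pv_resid_sum (ts : List Int) : ∀ (cd : List (String × Int)),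
    ((pvResid ts cd).map (fun kv => kv.2)).sum = pvOthers ts cd := by
  induction ts with
  | nil => intro cd; simp [pvResid, pvOthers, pvFirst]
  | cons t ts ih =>
      intro cd
      simp only [pvResid]
      rw [ih]
      unfold pvOthers
      rw [List.filter_filter]
      congr 2
      apply List.filter_congr
      intro a _
      rw [pv_first_cons]
      by_cases hgt : a.2 > t <;> simp [hgt]


theorem pv_others_perm (ts : List Int) {c c' : List (String × Int)} (h : c.Perm c') : pvOthers ts c = pvOthers ts c' := by
  unfold pvOthers
  exact List.Perm.sum_eq ((h.filter _).map _)

theorem pv_sum_pos_mem {l : List (String × Int)} (h : ((l.map (fun kv => kv.2)).sum : Int) > 0) : ∃ x, x ∈ l := by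
  cases l with
  | nil => simp at h
  | cons x xs => exact ⟨x, by simp⟩

theorem pv_pvPairs_shape : ∀ (ts : List Int) (cd : List (String × Int)) (p : String × Int), p ∈ pvPairs ts cd →
    ∃ t', p.1 = pvName t' ∧ (p.2 > 0 → ∃ kv ∈ cd, kv.2 > t') := by
  intro ts
  induction ts with
  | nil => intro cd p hp; simp [pvPairs] at hp
  | cons t ts ih =>
      intro cd p hp
      rcases List.mem_cons.mp hp with rfl | hp
      · refine ⟨t, rfl, fun hpos => ?_⟩
        rcases pv_sum_pos_mem hpos with ⟨kv, hkv⟩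
        have := List.mem_filter.mp hkv
        exact ⟨kv, this.1, by simpa using this.2⟩
      · rcases ih _ p hp with ⟨t', h1, h2⟩
        refine ⟨t', h1, fun hpos => ?_⟩
        rcases h2 hpos with ⟨kv, hkv, h3⟩
        exact ⟨kv, (List.mem_filter.mp hkv).1, h3⟩

theorem pv_name_inj_pv {a b : Int} (h : pvName a = pvName b) : a = b := by
  unfold pvName at h
  exact pv_name_inj h

theorem pv_pvPairs_pairwise : ∀ (ts : List Int) (cd : List (String × Int)),
    (pvPairs ts cd).Pairwise (fun p q => p.2 > 0 → q.2 > 0 → p.1 ≠ q.1) := by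
  intro ts
  induction ts with
  | nil => intro cd; simp [pvPairs]
  | cons t ts ih =>
      intro cd
      rw [pvPairs, List.pairwise_cons]
      refine ⟨?_, ih _⟩
      intro q hq _ hqpos heq
      rcases pv_pvPairs_shape _ _ q hq with ⟨t', h1, h2⟩
      rcases h2 hqpos with ⟨kv, hkv, h3⟩
      have hle : ¬ kv.2 > t := by simpa using (List.mem_filter.mp hkv).2
      have htt : t' < t := by omega
      rw [h1] at heq
      have := pv_name_inj_pv heq
      omega

-- B's while-loop on a descending list takes exactly the prefix above t
theorem pv_sweep (t : Int) : ∀ (l : List Int) (acc : Int), l.Pairwise (fun a b => b ≤ a) →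
    pvSweep t acc l = (acc + (l.filter (fun v => decide (v > t))).sum, l.filter (fun v => !decide (v > t))) := by
  intro l
  induction l with
  | nil => intro acc _; simp [pvSweep]
  | cons v vs ih =>
      intro acc hp
      rcases List.pairwise_cons.mp hp with ⟨hhead, htail⟩
      by_cases hv : v > t
      · rw [pvSweep, if_pos hv, ih (acc + v) htail]
        simp [hv, add_assoc]
      · rw [pvSweep, if_neg hv]
        have h1 : vs.filter (fun v => decide (v > t)) = [] := by
          apply List.filter_eq_nil_iff.mpr
          intro x hx
          have := hhead x hx
          simp
          omega
        have h2 : vs.filter (fun v => !decide (v > t)) = vs := by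
          apply List.filter_eq_self.mpr
          intro x hx
          have := hhead x hx
          simp
          omega
        simp [hv, h1, h2]

-- value-level analogues of pvPairs / pvResid
def pvPairsV : List Int → List Int → List (String × Int)
  | [], _ => []
  | t :: ts, vs => (pvName t, (vs.filter (fun v => decide (v > t))).sum)
      :: pvPairsV ts (vs.filter (fun v => !decide (v > t)))

def pvResidV : List Int → List Int → List Int
  | [], vs => vs
  | t :: ts, vs => pvResidV ts (vs.filter (fun v => !decide (v > t)))

-- B's outer loop = conditional inserts of pvPairsV + pvResidV (on a descending list)
theorem pv_outerB (ts : List Int) : ∀ (cur : List Int) (d : PySem.Dict String Int), cur.Pairwise (fun a b => b ≤ a) →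
    ts.foldl (fun (st : PySem.Dict String Int × List Int) t =>
        let r := pvSweep t 0 st.2
        ((if r.1 > 0 then st.1.insert ("above_" ++ PySem.Int.toStr t) r.1 else st.1), r.2)) (d, cur)
      = ((pvPairsV ts cur).foldl (fun d p => if p.2 > 0 then d.insert p.1 p.2 else d) d, pvResidV ts cur) := by
  induction ts with
  | nil => intro cur d _; simp [pvPairsV, pvResidV]
  | cons t ts ih =>
      intro cur d hp
      simp only [List.foldl_cons]
      rw [pv_sweep t cur 0 hp]
      rw [ih (cur.filter (fun v => !decide (v > t))) _ (hp.filter _)]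
      simp [pvPairsV, pvResidV, pvName]

-- transport from the value list back to the pair list (any rearrangement of the values)
theorem pv_pairsV_corr : ∀ (ts : List Int) (w : List Int) (cd : List (String × Int)),
    w.Perm (cd.map (fun kv => kv.2)) →
    pvPairsV ts w = pvPairs ts cd ∧ (pvResidV ts w).sum = ((pvResid ts cd).map (fun kv => kv.2)).sum := by
  intro ts
  induction ts with
  | nil =>
      intro w cd h
      exact ⟨rfl, by simpa [pvResidV, pvResid] using List.Perm.sum_eq h⟩
  | cons t ts ih =>
      intro w cd h
      have hmfn : ((cd.filter (fun kv => !decide (kv.2 > t))).map (fun kv => kv.2))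
          = (cd.map (fun kv => kv.2)).filter (fun v => !decide (v > t)) := by
        rw [List.filter_map]
        rfl
      have hmfp : ((cd.filter (fun kv => decide (kv.2 > t))).map (fun kv => kv.2))
          = (cd.map (fun kv => kv.2)).filter (fun v => decide (v > t)) := by
        rw [List.filter_map]
        rfl
      have hperm2 : (w.filter (fun v => !decide (v > t))).Perm
          ((cd.filter (fun kv => !decide (kv.2 > t))).map (fun kv => kv.2)) := by
        rw [hmfn]
        exact h.filter _
      obtain ⟨ih1, ih2⟩ := ih _ _ hperm2
      refine ⟨?_, by rw [pvResidV, pvResid]; exact ih2⟩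
      rw [pvPairsV, pvPairs, ih1]
      congr 2
      rw [hmfp]
      exact List.Perm.sum_eq (h.filter _)

-- the common normal form of both ports
def pvOut (ts : List Int) (cd : List (String × Int)) : List (String × Int) :=
  (pvPairs ts cd).filter (fun p => decide (p.2 > 0))
    ++ (if pvOthers ts cd > 0 then [("others", pvOthers ts cd)] else [])

theorem pv_fold_items (ts : List Int) (cd : List (String × Int)) :
    ((pvPairs ts cd).foldl (fun d p => if p.2 > 0 then d.insert p.1 p.2 else d) (PySem.Dict.empty : PySem.Dict String Int)).items
      = (pvPairs ts cd).filter (fun p => decide (p.2 > 0)) := by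
  rw [pv_items_condFold _ _ (fun p _ _ => PySem.Dict.contains_empty _) (pv_pvPairs_pairwise ts cd)]
  rfl

theorem pv_fold_not_contains_others (ts : List Int) (cd : List (String × Int)) :
    ((pvPairs ts cd).foldl (fun d p => if p.2 > 0 then d.insert p.1 p.2 else d) (PySem.Dict.empty : PySem.Dict String Int)).contains "others" = false := by
  rw [PySem.Dict.contains_eq_decide_mem_keys]
  simp only [PySem.Dict.keys, pv_fold_items, decide_eq_false_iff_not]
  intro hmem
  rcases List.mem_map.mp hmem with ⟨p, hp, hp1⟩
  rcases pv_pvPairs_shape ts cd p (List.mem_filter.mp hp).1 with ⟨t', h1, _⟩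
  rw [h1] at hp1
  exact pv_name_ne_others t' hp1

theorem pv_tail_items (ts : List Int) (cd : List (String × Int)) (o : Int) :
    (if o > 0 then ((pvPairs ts cd).foldl (fun d p => if p.2 > 0 then d.insert p.1 p.2 else d) (PySem.Dict.empty : PySem.Dict String Int)).insert "others" o
     else ((pvPairs ts cd).foldl (fun d p => if p.2 > 0 then d.insert p.1 p.2 else d) (PySem.Dict.empty : PySem.Dict String Int))).items
      = (pvPairs ts cd).filter (fun p => decide (p.2 > 0)) ++ (if o > 0 then [("others", o)] else []) := by
  by_cases ho : o > 0
  · rw [if_pos ho, if_pos ho,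
      PySem.Dict.items_insert_of_not_contains _ _ (pv_fold_not_contains_others ts cd), pv_fold_items]
  · rw [if_neg ho, if_neg ho, pv_fold_items, List.append_nil]

theorem pv_A_eq (ts : List Int) (cd : List (String × Int)) (h : ts ≠ []) :
    strategy_groups_by_distribution ts cd = pvOut ts cd := by
  unfold strategy_groups_by_distribution
  rw [if_neg h]
  have hperm : (PySem.List.sorted cd (fun x => x.2) true).Perm cd := PySem.List.sorted_perm cd (fun x => x.2) true
  simp only [pv_outer]
  rw [pv_resid_sum, pv_others_perm ts hperm, pv_pvPairs_perm ts hperm]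
  rw [pv_tail_items]
  rfl

theorem pv_B_eq (ts : List Int) (cd : List (String × Int)) (h : ts ≠ []) :
    strategy_groups_by_distribution_alt ts cd = pvOut ts cd := by
  unfold strategy_groups_by_distribution_alt
  rw [if_neg h]
  have hpair : (PySem.List.sorted (cd.map (fun kv => kv.2)) (fun x => x) true).Pairwise (fun a b => b ≤ a) :=
    PySem.List.sorted_pairwise_rev (cd.map (fun kv => kv.2)) (fun x => x)
  have hperm : (PySem.List.sorted (cd.map (fun kv => kv.2)) (fun x => x) true).Perm (cd.map (fun kv => kv.2)) :=
    PySem.List.sorted_perm (cd.map (fun kv => kv.2)) (fun x => x) true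
  obtain ⟨h1, h2⟩ := pv_pairsV_corr ts _ cd hperm
  simp only [pv_outerB ts _ _ hpair]
  rw [h1, h2, pv_resid_sum, pv_tail_items]
  rfl

-- ===== VERDICT (by name: the statement is the Claim_ definition above) =====
theorem strategy_groups_by_distribution_spec : Claim_equal_strategy_groups_by_distribution := by
  intro ts cd _ hpre
  unfold Spec_strategy_groups_by_distribution
  rw [pv_A_eq ts cd hpre, pv_B_eq ts cd hpre]
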